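-- pv_equiv track=rewrite | github.com/Eugenia-Z/PracticalProblems | Snowflake/MinimumTotalWeight.py | findMinWeight2
-- ===== SOURCE A (Python) =====
-- import heapq
--
-- def findMinWeight2(weights, d):
--     max_heap = [-w for w in weights]
--     heapq.heapify(max_heap)
--
--     for _ in range(d):
--         heaviest = -heapq.heappop(max_heap)
--         remaining = heaviest // 2  # floor division by 2
--         heapq.heappush(max_heap, -remaining)
--     return -sum(max_heap)
-- ===== SOURCE B (Python) =====
-- def findMinWeight2(weights, d):
--     ws = list(weights)
--     for _ in range(d):
--         i = 0
--         for j in range(1, len(ws)):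
--             if ws[j] > ws[i]:
--                 i = j
--         ws[i] = ws[i] // 2  # IndexError here when ws is empty, like A's heappop
--     return sum(ws)
-- ===== Notes on version B (the rewrite author's own statement) =====
-- stated objective: simpler
-- what changed: Replaces the negated max-heap (heapify/heappop/heappush) with a plain list and a repeated linear argmax scan that halves the maximum in place, then sums.
import Mathlib
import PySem

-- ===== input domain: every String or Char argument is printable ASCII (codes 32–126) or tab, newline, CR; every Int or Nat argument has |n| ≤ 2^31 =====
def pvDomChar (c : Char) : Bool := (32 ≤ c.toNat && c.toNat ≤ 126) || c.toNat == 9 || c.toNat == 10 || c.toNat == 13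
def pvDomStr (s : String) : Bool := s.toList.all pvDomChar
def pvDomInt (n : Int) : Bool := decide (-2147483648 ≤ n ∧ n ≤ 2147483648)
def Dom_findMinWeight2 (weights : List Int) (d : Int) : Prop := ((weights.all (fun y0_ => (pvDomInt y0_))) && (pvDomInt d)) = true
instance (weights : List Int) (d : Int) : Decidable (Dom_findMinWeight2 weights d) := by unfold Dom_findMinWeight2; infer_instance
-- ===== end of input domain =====

-- B replaces A's negated max-heap with a plain list and a repeated linear argmax scan
-- that halves the maximum in place (simpler); return values only: A mutates its own heap
-- list, B copies the input, neither mutates the argument.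

-- ===== PORT A =====
-- heapq is a library call, ported by its contract, which is exact for Int elements
-- observed as a multiset: heappop removes and returns a minimum element (none =
-- IndexError on an empty heap), heappush adds the element, heapify only reorders the
-- list, so multiset-wise it is the identity.  The internal heap layout is unobservable
-- here: only the popped minimum values and the final sum are used.
def pvHeappop (h : List Int) : Option (Int × List Int) :=
  match PySem.List.min? h (fun x => x) with
  | none => none
  | some m =>
    match PySem.List.remove? h m with
    | none => none   -- unreachable: the minimum is a member
    | some h' => some (m, h')

def pvStepA (st : Option (List Int)) (_ : Int) : Option (List Int) :=
  match st with
  | none => none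
  | some h =>
    match pvHeappop h with
    | none => none   -- IndexError propagates
    | some (m, h') =>
      let heaviest := -m
      let remaining := PySem.Int.floordiv heaviest 2
      some ((-remaining) :: h')

def findMinWeight2 (weights : List Int) (d : Int) : Int :=
  -- max_heap = [-w for w in weights]; heapify (multiset-identity) then the d-step loop
  match (PySem.List.pyRange 0 d 1).foldl pvStepA (some (weights.map (fun w => -w))) with
  | none => 0   -- unreachable under Pre_ (A raises IndexError there)
  | some h => -(h.sum)

-- ===== PORT B =====
-- index of the first maximum: i = 0; for j in range(1, len(ws)): if ws[j] > ws[i]: i = j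
-- (indices produced by the range are always in bounds, so the getD default is never used)
def pvArgmax (ws : List Int) : Nat :=
  (PySem.List.pyRange 1 (ws.length : Int) 1).foldl
    (fun i j => if ws.getD j.toNat 0 > ws.getD i 0 then j.toNat else i) 0

def pvStepB (st : Option (List Int)) (_ : Int) : Option (List Int) :=
  match st with
  | none => none
  | some ws =>
    let i := pvArgmax ws
    match PySem.List.pyGet? ws (i : Int) with
    | none => none   -- IndexError (ws empty) propagates
    | some v => some (ws.set i (PySem.Int.floordiv v 2))

def findMinWeight2_alt (weights : List Int) (d : Int) : Int :=
  match (PySem.List.pyRange 0 d 1).foldl pvStepB (some weights) with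
  | none => 0   -- unreachable under Pre_ (B raises IndexError there)
  | some ws => ws.sum

-- ===== PRECONDITION & SPEC =====
-- Excluded: weights = [] with d > 0, where both A (heappop) and B (ws[0]) raise IndexError.
def Pre_findMinWeight2 (weights : List Int) (d : Int) : Prop := d ≤ 0 ∨ weights ≠ []
instance (weights : List Int) (d : Int) : Decidable (Pre_findMinWeight2 weights d) := by
  unfold Pre_findMinWeight2; infer_instance

def pvWitness_findMinWeight2 : List Int × Int := ([9, 3, 5], 4)

def Spec_findMinWeight2 (weights : List Int) (d : Int) (out : Int) : Prop := out = findMinWeight2_alt weights d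
instance (weights : List Int) (d : Int) (out : Int) : Decidable (Spec_findMinWeight2 weights d out) := by unfold Spec_findMinWeight2; infer_instance

-- ===== CLAIM (what is proved, stated in full; the proofs are below) =====
def Claim_equal_findMinWeight2 : Prop := ∀ (weights : List Int) (d : Int), Dom_findMinWeight2 weights d → Pre_findMinWeight2 weights d → Spec_findMinWeight2 weights d (findMinWeight2 weights d)

-- ===== LEMMAS AND PROOFS =====

-- The coupling invariant between A's heap and B's list: B's list is nonempty and A's heap
-- holds exactly the negations of B's elements, as multisets.
def pvInv (h ws : List Int) : Prop :=
  ws ≠ [] ∧ (↑h : Multiset Int) = Multiset.map (fun x => -x) (↑ws : Multiset Int)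

-- argmax scan: after scanning range(1, m) the chosen index is < m and maximises the prefix
theorem pvArgmax_aux (ws : List Int) (m : Nat) (h1 : 1 ≤ m) :
    ((PySem.List.pyRange 1 (m : Int) 1).foldl
      (fun i j => if ws.getD j.toNat 0 > ws.getD i 0 then j.toNat else i) 0) < m ∧
    ∀ k, k < m → ws.getD k 0 ≤
      ws.getD ((PySem.List.pyRange 1 (m : Int) 1).foldl
        (fun i j => if ws.getD j.toNat 0 > ws.getD i 0 then j.toNat else i) 0) 0 := by
  induction m with
  | zero => omega
  | succ m ih =>
    rcases Nat.lt_or_ge 1 (m + 1) with hm | hm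
    · have hm1 : 1 ≤ m := by omega
      obtain ⟨ihlt, ihmax⟩ := ih hm1
      have hsplit : PySem.List.pyRange 1 ((m + 1 : Nat) : Int) 1
          = PySem.List.pyRange 1 (m : Int) 1 ++ [(m : Int)] := by
        push_cast
        exact PySem.List.pyRange_one_succ_right (by exact_mod_cast hm1)
      rw [hsplit, List.foldl_append]
      simp only [List.foldl_cons, List.foldl_nil, Int.toNat_natCast]
      split_ifs with hgt
      · refine ⟨by omega, fun k hk => ?_⟩
        rcases Nat.lt_or_ge k m with hkm | hkm
        · exact le_of_lt (lt_of_le_of_lt (ihmax k hkm) hgt)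
        · have : k = m := by omega
          subst this; exact le_refl _
      · refine ⟨by omega, fun k hk => ?_⟩
        rcases Nat.lt_or_ge k m with hkm | hkm
        · exact ihmax k hkm
        · have : k = m := by omega
          subst this; exact le_of_not_gt hgt
    · have : m + 1 = 1 := by omega
      rw [this]
      have : PySem.List.pyRange 1 ((1 : Nat) : Int) 1 = [] :=
        PySem.List.pyRange_one_eq_nil (by norm_num)
      rw [this]
      simp only [List.foldl_nil]
      refine ⟨by omega, fun k hk => ?_⟩
      have : k = 0 := by omega
      subst this
      exact le_refl _

theorem pvArgmax_spec (ws : List Int) (hne : ws ≠ []) :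
    pvArgmax ws < ws.length ∧ ∀ y ∈ ws, y ≤ ws.getD (pvArgmax ws) 0 := by
  obtain ⟨hlt, hmax⟩ := pvArgmax_aux ws ws.length (List.length_pos_iff.mpr hne)
  refine ⟨hlt, fun y hy => ?_⟩
  obtain ⟨k, hk, rfl⟩ := List.getElem_of_mem hy
  have := hmax k hk
  rwa [List.getD_eq_getElem ws 0 hk] at this

-- multiset view of an in-place update at a valid index
theorem multiset_set (l : List Int) (n : Nat) (a : Int) (h : n < l.length) :
    (↑(l.set n a) : Multiset Int) = a ::ₘ (↑l : Multiset Int).erase l[n] := by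
  have hdrop : l.drop n = l[n] :: l.drop (n + 1) := (List.getElem_cons_drop h).symm
  have hcoe : (↑l : Multiset Int)
      = ↑(l.take n) + l[n] ::ₘ (↑(l.drop (n + 1)) : Multiset Int) := by
    calc (↑l : Multiset Int) = ↑(l.take n ++ l.drop n) := by rw [List.take_append_drop]
      _ = ↑(l.take n) + (↑(l.drop n) : Multiset Int) := by rw [← Multiset.coe_add]
      _ = ↑(l.take n) + l[n] ::ₘ (↑(l.drop (n + 1)) : Multiset Int) := by
            rw [hdrop, Multiset.cons_coe]
  rw [List.set_eq_take_cons_drop a h, hcoe]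
  rw [Multiset.erase_add_right_pos _ (Multiset.mem_cons_self _ _), Multiset.erase_cons_head]
  rw [← Multiset.coe_add, ← Multiset.cons_coe, Multiset.add_cons]

-- one loop iteration preserves the coupling invariant
theorem pvStep_rel (h ws : List Int) (j : Int) (hinv : pvInv h ws) :
    ∃ h' ws', pvStepA (some h) j = some h' ∧ pvStepB (some ws) j = some ws' ∧ pvInv h' ws' := by
  obtain ⟨hne, hmul⟩ := hinv
  obtain ⟨hilt, himax⟩ := pvArgmax_spec ws hne
  set i := pvArgmax ws with hi
  set v := ws[i] with hv
  have hgetD : ws.getD i 0 = v := List.getD_eq_getElem ws 0 hilt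
  have hvmem : v ∈ ws := List.getElem_mem hilt
  have hvmax : ∀ y ∈ ws, y ≤ v := by intro y hy; have := himax y hy; rwa [hgetD] at this
  -- B's step
  have hget : PySem.List.pyGet? ws (i : Int) = some v := by
    rw [PySem.List.pyGet?_natCast]
    exact List.getElem?_eq_some_iff.mpr ⟨hilt, rfl⟩
  have hB : pvStepB (some ws) j = some (ws.set i (PySem.Int.floordiv v 2)) := by
    simp only [pvStepB, ← hi, hget]
  -- A's step: the heap is nonempty, its minimum is -v
  have hne' : h ≠ [] := by
    intro hnil
    subst hnil
    have h0 : Multiset.map (fun x : Int => -x) (↑ws : Multiset Int) = 0 := by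
      simpa using hmul.symm
    rw [Multiset.map_eq_zero, Multiset.coe_eq_zero] at h0
    exact hne h0
  obtain ⟨m, hm⟩ : ∃ m, PySem.List.min? h (fun x => x) = some m := by
    cases hmin : PySem.List.min? h (fun x => x) with
    | none => exact absurd ((PySem.List.min?_eq_none_iff h (fun x => x)).mp hmin) hne'
    | some m => exact ⟨m, rfl⟩
  have hmmem : m ∈ h := PySem.List.min?_mem hm
  have hmmin : ∀ y ∈ h, m ≤ y := fun y hy => PySem.List.min?_isMin hm y hy
  have hmemmul : ∀ y : Int, y ∈ h ↔ y ∈ Multiset.map (fun x => -x) (↑ws : Multiset Int) := by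
    intro y
    rw [← hmul]; simp
  have hmeq : m = -v := by
    have h1 : -v ∈ h := by
      rw [hmemmul]
      exact Multiset.mem_map_of_mem _ (by simpa using hvmem)
    have h2 : m ≤ -v := hmmin _ h1
    obtain ⟨w, hwmem, hweq⟩ : ∃ w ∈ ws, -w = m := by
      have := (hmemmul m).mp hmmem
      simpa using this
    have h3 : -v ≤ m := by
      rw [← hweq]
      exact neg_le_neg (hvmax w hwmem)
    omega
  have hrem : PySem.List.remove? h m = some (h.erase m) :=
    PySem.List.remove?_eq_some_erase h m hmmem
  have hA : pvStepA (some h) j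
      = some ((-(PySem.Int.floordiv (-m) 2)) :: h.erase m) := by
    simp only [pvStepA, pvHeappop, hm, hrem]
  refine ⟨_, _, hA, hB, ?_, ?_⟩
  · intro hnil
    have h0 : ws.length = 0 := by simpa using congrArg List.length hnil
    exact hne (List.length_eq_zero_iff.mp h0)
  · rw [multiset_set ws i _ hilt, ← hv, hmeq, neg_neg]
    rw [← Multiset.cons_coe, ← Multiset.coe_erase]
    rw [Multiset.map_cons, hmul]
    rw [Multiset.map_erase _ (fun a b hab => by omega) v _]

-- the whole loop preserves the coupling invariant
theorem pvFold_rel (l : List Int) : ∀ h ws : List Int, pvInv h ws →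
    ∃ h' ws', l.foldl pvStepA (some h) = some h' ∧ l.foldl pvStepB (some ws) = some ws' ∧
      pvInv h' ws' := by
  induction l with
  | nil => exact fun h ws hinv => ⟨h, ws, rfl, rfl, hinv⟩
  | cons j t ih =>
    intro h ws hinv
    obtain ⟨h1, ws1, hA1, hB1, hinv1⟩ := pvStep_rel h ws j hinv
    obtain ⟨h', ws', hA', hB', hinv'⟩ := ih h1 ws1 hinv1
    exact ⟨h', ws', by simpa [hA1] using hA', by simpa [hB1] using hB', hinv'⟩

theorem sum_map_neg_list (l : List Int) : (l.map (fun w => -w)).sum = -l.sum := by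
  induction l with
  | nil => simp
  | cons x t ih => simp [ih]; ring

-- ===== VERDICT (by name: the statement is the Claim_ definition above) =====
theorem findMinWeight2_spec : Claim_equal_findMinWeight2 := by
  intro weights d _ hpre
  unfold Spec_findMinWeight2 findMinWeight2 findMinWeight2_alt
  rcases Nat.lt_or_ge 0 d.toNat with hd | hd
  · -- d > 0: Pre_ gives weights ≠ []; run the coupled loop
    have hne : weights ≠ [] := by
      rcases hpre with hle | hne
      · omega
      · exact hne
    have hinv0 : pvInv (weights.map (fun w => -w)) weights := by
      refine ⟨hne, ?_⟩
      simp
    obtain ⟨h', ws', hA', hB', hne', hmul'⟩ :=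
      pvFold_rel (PySem.List.pyRange 0 d 1) _ _ hinv0
    rw [hA', hB']
    have hsum : (↑h' : Multiset Int).sum = -(↑ws' : Multiset Int).sum := by
      rw [hmul', Multiset.sum_map_neg']
    simpa using congrArg Neg.neg hsum
  · -- d ≤ 0: the range is empty, both sides are the plain sum
    have hnil : PySem.List.pyRange 0 d 1 = [] :=
      PySem.List.pyRange_one_eq_nil (by omega)
    rw [hnil]
    simp only [List.foldl_nil]
    rw [sum_map_neg_list, neg_neg]
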